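-- pv_equiv track=rewrite | github.com/frost0807/coding-test-study | 유채우/푸드 파이트 대회.py | solution
-- ===== SOURCE A (Python) =====
-- def solution(food):
--     answer = ''
--     for i in range(1, len(food)):
--         if food[i] % 2 == 0:  # 짝수
--             for a in range(food[i] // 2):
--                 answer += str(i)
--         else:  # 홀수
--             num_food = food[i] - 1
--             for b in range(num_food // 2):
--                 answer += str(i)
--
--     answer += '0'
--
--     for i in range(len(food) - 1, 0, -1):
--         if food[i] % 2 == 0:  # 짝수
--             for a in range(food[i] // 2):
--                 answer += str(i)
--         else:  # 홀수
--             num_food = food[i] - 1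
--             for b in range(num_food // 2):
--                 answer += str(i)
--
--     return answer
-- ===== SOURCE B (Python) =====
-- def solution(food):
--     # Build only the right half (centre '0' first, then blocks for i descending)
--     # in ONE backward scan; the answer is the mirror of that list followed by
--     # its tail: reversed(parts) + parts[1:].
--     parts = ['0']
--     for i in range(len(food) - 1, 0, -1):
--         parts.append(str(i) * (food[i] // 2))
--     return ''.join(parts[::-1] + parts[1:])
-- ===== Notes on version B (the rewrite author's own statement) =====
-- stated objective: faster
-- what changed: Replaces A's two staged index-loop passes with nested per-character string += loops by a single backward scan that builds only the right half as a list (the centre '0' seeded first, one block per index), then emits the mirror of that list followed by its tail (parts[::-1] + parts[1:]), collapsing the redundant even/odd branches into food[i]//2.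
import Mathlib
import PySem

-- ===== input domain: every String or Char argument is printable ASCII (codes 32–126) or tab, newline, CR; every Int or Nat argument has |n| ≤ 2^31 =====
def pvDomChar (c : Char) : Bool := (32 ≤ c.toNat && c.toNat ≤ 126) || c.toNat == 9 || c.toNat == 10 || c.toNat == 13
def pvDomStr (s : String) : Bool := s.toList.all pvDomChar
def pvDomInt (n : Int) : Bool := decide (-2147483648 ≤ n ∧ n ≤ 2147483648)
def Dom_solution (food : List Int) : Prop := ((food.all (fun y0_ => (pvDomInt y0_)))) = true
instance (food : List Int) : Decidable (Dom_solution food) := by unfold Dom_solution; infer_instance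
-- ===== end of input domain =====

-- B builds only the right half (centre-first, one backward scan) and mirrors that list,
-- instead of A's two staged index-loop passes; return values proved equal, no side effects.

-- ===== PORT A =====
-- one iteration of A's outer loops: the even/odd if-else, each branch an inner
-- 'for _ in range(cnt): answer += str(i)' append loop
def solStepA (food : List Int) (answer : List Char) (i : Int) : List Char :=
  if PySem.Int.mod (PySem.List.pyGetD food i 0) 2 = 0 then
    (PySem.List.pyRange 0 (PySem.Int.floordiv (PySem.List.pyGetD food i 0) 2) 1).foldl
      (fun a _ => a ++ PySem.Int.toChars i) answer
  else
    let numFood := PySem.List.pyGetD food i 0 - 1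
    (PySem.List.pyRange 0 (PySem.Int.floordiv numFood 2) 1).foldl
      (fun a _ => a ++ PySem.Int.toChars i) answer

def solution (food : List Int) : String :=
  let answer : List Char :=
    (PySem.List.pyRange 1 (PySem.List.len food) 1).foldl (solStepA food) []
  let answer := answer ++ ['0']
  let answer :=
    (PySem.List.pyRange (PySem.List.len food - 1) 0 (-1)).foldl (solStepA food) answer
  String.ofList answer

-- ===== PORT B =====
-- str(i) * k  (Python string repetition; negative k gives '')
def strMulChars (s : List Char) (k : Int) : List Char := (List.replicate k.toNat s).flatten

def solution_alt (food : List Int) : String :=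
  let parts : List (List Char) :=
    (PySem.List.pyRange (PySem.List.len food - 1) 0 (-1)).foldl
      (fun ps i => ps ++ [strMulChars (PySem.Int.toChars i)
        (PySem.Int.floordiv (PySem.List.pyGetD food i 0) 2)]) [['0']]
  -- parts[::-1] + parts[1:]  (slice?_none_none_neg_one: [::-1] is reverse; slice_from_one: [1:] is tail)
  String.ofList ((parts.reverse ++ parts.tail).flatten)

-- ===== PRECONDITION & SPEC =====
def Spec_solution (food : List Int) (out : String) : Prop := out = solution_alt food
instance (food : List Int) (out : String) : Decidable (Spec_solution food out) := by unfold Spec_solution; infer_instance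

-- ===== CLAIM (what is proved, stated in full; the proofs are below) =====
def Claim_equal_solution : Prop := ∀ (food : List Int), Dom_solution food → Spec_solution food (solution food)

-- ===== LEMMAS AND PROOFS =====

-- the block contributed by index i
def blockOf (food : List Int) (i : Int) : List Char :=
  strMulChars (PySem.Int.toChars i) (PySem.Int.floordiv (PySem.List.pyGetD food i 0) 2)

-- A's inner append loop produces exactly one block
lemma foldl_append_const {α : Type} (l : List α) (s acc : List Char) :
    l.foldl (fun a _ => a ++ s) acc = acc ++ (List.replicate l.length s).flatten := by
  induction l generalizing acc with
  | nil => simp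
  | cons x t ih =>
    simp [List.foldl_cons, ih, List.replicate_succ, List.append_assoc]

-- for odd f (Python mod), (f-1)//2 = f//2
lemma floordiv_pred_two (f : Int) (h : PySem.Int.mod f 2 ≠ 0) :
    PySem.Int.floordiv (f - 1) 2 = PySem.Int.floordiv f 2 := by
  have h1 := PySem.Int.mod_nonneg f (b := 2) (by norm_num)
  have h2 := PySem.Int.mod_lt f (b := 2) (by norm_num)
  have h3 := PySem.Int.floordiv_mul_add_mod f 2
  rw [PySem.Int.floordiv_eq_iff_of_pos (by norm_num)]
  omega

-- one step of A's loop appends exactly the block for that index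
lemma solStepA_eq (food : List Int) :
    solStepA food = fun acc i => acc ++ blockOf food i := by
  funext acc i
  unfold solStepA blockOf strMulChars
  split_ifs with h
  · rw [foldl_append_const, PySem.List.length_pyRange_one, sub_zero]
  · rw [foldl_append_const, PySem.List.length_pyRange_one,
      floordiv_pred_two _ h, sub_zero]

-- B's accumulation loop appends one block per index, after the seeded centre
lemma foldl_append_singleton {α β : Type} (l : List α) (f : α → β) (init : List β) :
    l.foldl (fun ps i => ps ++ [f i]) init = init ++ l.map f := by
  induction l generalizing init with
  | nil => simp
  | cons x t ih => simp [List.foldl_cons, ih, List.append_assoc]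

-- ===== VERDICT (by name: the statement is the Claim_ definition above) =====
theorem solution_spec : Claim_equal_solution := by
  intro food _
  show solution food = solution_alt food
  unfold solution solution_alt
  have hrev : PySem.List.pyRange (PySem.List.len food - 1) 0 (-1)
      = (PySem.List.pyRange 1 (PySem.List.len food) 1).reverse := by
    rw [PySem.List.pyRange_neg_one_eq_reverse]; norm_num
  rw [solStepA_eq, hrev,
    show (fun ps i => ps ++ [strMulChars (PySem.Int.toChars i)
        (PySem.Int.floordiv (PySem.List.pyGetD food i 0) 2)])
      = (fun ps i => ps ++ [blockOf food i]) from rfl,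
    foldl_append_singleton]
  simp only [PySem.List.foldl_append_eq_flatMap]
  simp [List.flatMap_def, List.append_assoc, List.map_reverse]
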